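-- pv_equiv track=rewrite | github.com/everyoneelse/MedResearcher-R1 | KnowledgeGraphConstruction/lib/qa_generator.py | _analyze_relationship_chains
-- ===== SOURCE A (Python) =====
-- from typing import Dict, List, Any, Tuple
--
-- def _analyze_relationship_chains(nodes: List[Dict], relations: List[Dict]) -> List[str]:
--     """分析关系链"""
--     chains = []
--
--     # 构建关系图
--     graph = {}
--     for relation in relations:
--         source = relation.get('source') or relation.get('head') or relation.get('from')
--         target = relation.get('target') or relation.get('tail') or relation.get('to')
--         rel_type = relation.get('type') or relation.get('relation') or 'related_to'
--
--         if source not in graph: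
--             graph[source] = []
--         graph[source].append((target, rel_type))
--
--     # 查找2-3跳的关系链
--     for start_node in graph:
--         for target1, rel1 in graph.get(start_node, []):
--             chains.append(f"{start_node} --[{rel1}]--> {target1}")
--
--             # 继续查找下一跳
--             for target2, rel2 in graph.get(target1, []):
--                 chains.append(f"{start_node} --[{rel1}]--> {target1} --[{rel2}]--> {target2}")
--
--     return chains[:5]  # 返回前5个关系链
-- ===== SOURCE B (Python) =====
-- def _analyze_relationship_chains(nodes, relations):
--     """Graph-free re-implementation: start nodes in first-appearance order, edges by scanning relations."""
--     def src(rel):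
--         return rel.get('source') or rel.get('head') or rel.get('from')
--
--     def tgt(rel):
--         return rel.get('target') or rel.get('tail') or rel.get('to')
--
--     def rtyp(rel):
--         return rel.get('type') or rel.get('relation') or 'related_to'
--
--     starts = list(dict.fromkeys(src(rel) for rel in relations))
--     chains = []
--     for start in starts:
--         for rel in relations:
--             if src(rel) == start:
--                 t1, r1 = tgt(rel), rtyp(rel)
--                 chains.append(f"{start} --[{r1}]--> {t1}")
--                 for rel2 in relations:
--                     if src(rel2) == t1:
--                         chains.append(f"{start} --[{r1}]--> {t1} --[{rtyp(rel2)}]--> {tgt(rel2)}")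
--     return chains[:5]
-- ===== Notes on version B (the rewrite author's own statement) =====
-- stated objective: alternative
-- what changed: B never builds the graph dict: it dedups the extracted sources into a first-appearance-ordered start list and finds each node's outgoing edges by filtering scans of the relations list, emitting the same 1- and 2-hop chain strings and returning the first five.
import Mathlib
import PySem

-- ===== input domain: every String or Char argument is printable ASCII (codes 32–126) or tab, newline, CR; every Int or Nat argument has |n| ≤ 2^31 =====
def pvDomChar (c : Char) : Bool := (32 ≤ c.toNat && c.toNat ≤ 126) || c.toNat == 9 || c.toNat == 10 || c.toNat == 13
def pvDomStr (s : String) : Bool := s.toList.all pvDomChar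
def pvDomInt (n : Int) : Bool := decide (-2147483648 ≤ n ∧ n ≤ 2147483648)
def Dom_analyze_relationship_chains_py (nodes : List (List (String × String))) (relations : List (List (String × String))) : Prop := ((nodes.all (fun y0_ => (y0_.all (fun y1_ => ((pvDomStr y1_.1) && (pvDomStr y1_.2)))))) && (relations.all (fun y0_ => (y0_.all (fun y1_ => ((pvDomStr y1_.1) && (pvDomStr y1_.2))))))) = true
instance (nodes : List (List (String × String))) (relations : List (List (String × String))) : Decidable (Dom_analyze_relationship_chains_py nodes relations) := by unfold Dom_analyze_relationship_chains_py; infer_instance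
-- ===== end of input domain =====

-- B replaces A's graph-dict construction by direct rescans of the relation list (dedup'd start
-- nodes in first-appearance order, edges found by filtering scans); alternative decomposition,
-- not claimed faster. Return-value equivalence only (neither program mutates its arguments).

-- ===== shared helpers: Python `x or y` on str/None values, dict.get, and the f-strings =====
-- Python `a or b` where a : Optional[str]: '' and None are falsy
def pyOrOpt (a b : Option String) : Option String :=
  match a with
  | some s => if s = "" then b else some s
  | none => b

-- Python `a or b` where b is a (truthy) string literal fallback
def pyOrStr (a : Option String) (b : String) : String :=
  match a with
  | some s => if s = "" then b else s
  | none => b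

-- relation.get(k) on the dict `relation`
def pvGet (rel : List (String × String)) (k : String) : Option String :=
  (PySem.Dict.mk rel).get? k

-- relation.get('source') or relation.get('head') or relation.get('from')
def pvSrc (rel : List (String × String)) : Option String :=
  pyOrOpt (pyOrOpt (pvGet rel "source") (pvGet rel "head")) (pvGet rel "from")

def pvTgt (rel : List (String × String)) : Option String :=
  pyOrOpt (pyOrOpt (pvGet rel "target") (pvGet rel "tail")) (pvGet rel "to")

def pvRtyp (rel : List (String × String)) : String :=
  pyOrStr (pyOrOpt (pvGet rel "type") (pvGet rel "relation")) "related_to"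

-- f-string interpolation of an Optional[str]
def pvFmt (o : Option String) : String :=
  match o with
  | some s => s
  | none => "None"

-- f"{start} --[{rel1}]--> {target1}"
def pvChain1 (start t1 : Option String) (r1 : String) : String :=
  pvFmt start ++ " --[" ++ r1 ++ "]--> " ++ pvFmt t1

-- f"{start} --[{rel1}]--> {target1} --[{rel2}]--> {target2}"
def pvChain2 (start t1 t2 : Option String) (r1 r2 : String) : String :=
  pvFmt start ++ " --[" ++ r1 ++ "]--> " ++ pvFmt t1 ++ " --[" ++ r2 ++ "]--> " ++ pvFmt t2

-- ===== PORT A =====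
def analyze_relationship_chains_py (nodes : List (List (String × String))) (relations : List (List (String × String))) : List String :=
  -- build the relation graph: if source not in graph: graph[source] = []; graph[source].append((target, rel_type))
  let graph : PySem.Dict (Option String) (List (Option String × String)) :=
    relations.foldl
      (fun g rel => g.modify (pvSrc rel) [] (fun l => l ++ [(pvTgt rel, pvRtyp rel)]))
      PySem.Dict.empty
  -- 2-3 hop chains
  let chains : List String :=
    graph.keys.foldl (fun acc start =>
      (graph.getD start []).foldl (fun acc1 e1 =>
        (graph.getD e1.1 []).foldl (fun acc2 e2 =>
            acc2 ++ [pvChain2 start e1.1 e2.1 e1.2 e2.2])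
          (acc1 ++ [pvChain1 start e1.1 e1.2])) acc) []
  PySem.List.slice chains none (some 5)  -- chains[:5]

-- ===== PORT B =====
def analyze_relationship_chains_py_alt (nodes : List (List (String × String))) (relations : List (List (String × String))) : List String :=
  -- starts = list(dict.fromkeys(src(rel) for rel in relations))
  let starts : List (Option String) := PySem.List.dedup (relations.map pvSrc)
  let chains : List String :=
    starts.foldl (fun acc start =>
      relations.foldl (fun acc1 rel =>
        if pvSrc rel == start then
          let t1 := pvTgt rel
          let r1 := pvRtyp rel
          relations.foldl (fun acc2 rel2 =>
              if pvSrc rel2 == t1 then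
                acc2 ++ [pvChain2 start t1 (pvTgt rel2) r1 (pvRtyp rel2)]
              else acc2)
            (acc1 ++ [pvChain1 start t1 r1])
        else acc1) acc) []
  PySem.List.slice chains none (some 5)  -- chains[:5]

-- ===== PRECONDITION & SPEC =====
def Spec_analyze_relationship_chains_py (nodes : List (List (String × String))) (relations : List (List (String × String))) (out : List String) : Prop := out = analyze_relationship_chains_py_alt nodes relations
instance (nodes : List (List (String × String))) (relations : List (List (String × String))) (out : List String) : Decidable (Spec_analyze_relationship_chains_py nodes relations out) := by unfold Spec_analyze_relationship_chains_py; infer_instance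

-- ===== CLAIM (what is proved, stated in full; the proofs are below) =====
def Claim_equal_analyze_relationship_chains_py : Prop := ∀ (nodes : List (List (String × String))) (relations : List (List (String × String))), Dom_analyze_relationship_chains_py nodes relations → Spec_analyze_relationship_chains_py nodes relations (analyze_relationship_chains_py nodes relations)

-- ===== LEMMAS AND PROOFS =====

-- the edge list A stores under key n is exactly B's filtering scan of the relations
theorem pv_graph_getD (relations : List (List (String × String))) (n : Option String) :
    (relations.foldl
        (fun g rel => g.modify (pvSrc rel) [] (fun l => l ++ [(pvTgt rel, pvRtyp rel)]))
        (PySem.Dict.empty : PySem.Dict (Option String) (List (Option String × String)))).getD n []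
      = (relations.filter (fun rel => pvSrc rel == n)).map (fun rel => (pvTgt rel, pvRtyp rel)) := by
  rw [show (fun (g : PySem.Dict (Option String) (List (Option String × String))) rel =>
        g.modify (pvSrc rel) [] (fun l => l ++ [(pvTgt rel, pvRtyp rel)]))
      = (fun g rel => (fun d (p : Option String × (Option String × String)) =>
          d.modify p.1 [] (fun l => l ++ [p.2])) g ((pvSrc rel, (pvTgt rel, pvRtyp rel)))) from rfl,
    ← List.foldl_map (f := fun rel => ((pvSrc rel, (pvTgt rel, pvRtyp rel))))
        (g := fun (d : PySem.Dict (Option String) (List (Option String × String)))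
            (p : Option String × (Option String × String)) => d.modify p.1 [] (fun l => l ++ [p.2])),
    PySem.Dict.getD_foldl_modify_append]
  simp [List.filter_map, Function.comp_def]

-- A's iteration order over graph keys is B's first-appearance dedup of the sources
theorem pv_graph_keys (relations : List (List (String × String))) :
    (relations.foldl
        (fun g rel => g.modify (pvSrc rel) [] (fun l => l ++ [(pvTgt rel, pvRtyp rel)]))
        (PySem.Dict.empty : PySem.Dict (Option String) (List (Option String × String)))).keys
      = PySem.List.dedup (relations.map pvSrc) := by
  rw [PySem.Dict.keys_foldl_modify_key (key := pvSrc)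
      (f := fun _ rel => (fun l => l ++ [(pvTgt rel, pvRtyp rel)]))]
  simp [PySem.Set.update_nil_left]

-- ===== VERDICT (by name: the statement is the Claim_ definition above) =====
theorem analyze_relationship_chains_py_spec : Claim_equal_analyze_relationship_chains_py := by
  intro nodes relations _
  unfold Spec_analyze_relationship_chains_py analyze_relationship_chains_py analyze_relationship_chains_py_alt
  simp only [pv_graph_getD, pv_graph_keys, List.foldl_filter, List.foldl_map]
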